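-- pv_equiv track=rewrite | github.com/RomarQ/wizengamot | backend/storage.py | extract_prompt_title
-- ===== SOURCE A (Python) =====
-- from typing import List, Dict, Any, Optional
--
-- def extract_prompt_title(system_prompt: Optional[str]) -> Optional[str]:
--     """
--     Extract the title from a system prompt (first # heading).
--
--     Args:
--         system_prompt: The system prompt content
--
--     Returns:
--         The title or None if no prompt or no title found
--     """
--     if not system_prompt:
--         return None
--
--     for line in system_prompt.strip().split('\n'):
--         line = line.strip()
--         if line.startswith('# '):
--             return line[2:].strip()
--
--     return None
-- ===== SOURCE B (Python) =====
-- import re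
--
-- _HEADING = re.compile(r'^[^\S\n]*# (.*)$', re.MULTILINE)
--
--
-- def extract_prompt_title(system_prompt):
--     """Extract the title from a system prompt (first '# ' heading) via one
--     multiline regex search instead of a manual per-line scan."""
--     if not system_prompt:
--         return None
--     for m in _HEADING.finditer(system_prompt.strip()):
--         title = m.group(1).strip()
--         if title:
--             return title
--     return None
-- ===== Notes on version B (the rewrite author's own statement) =====
-- stated objective: idiomatic
-- what changed: Replaces the manual strip/split/startswith per-line loop with a single compiled re.MULTILINE regex search (finditer over r'^[^\S\n]*# (.*)$') that yields the first heading with a non-empty stripped title.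
import Mathlib
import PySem

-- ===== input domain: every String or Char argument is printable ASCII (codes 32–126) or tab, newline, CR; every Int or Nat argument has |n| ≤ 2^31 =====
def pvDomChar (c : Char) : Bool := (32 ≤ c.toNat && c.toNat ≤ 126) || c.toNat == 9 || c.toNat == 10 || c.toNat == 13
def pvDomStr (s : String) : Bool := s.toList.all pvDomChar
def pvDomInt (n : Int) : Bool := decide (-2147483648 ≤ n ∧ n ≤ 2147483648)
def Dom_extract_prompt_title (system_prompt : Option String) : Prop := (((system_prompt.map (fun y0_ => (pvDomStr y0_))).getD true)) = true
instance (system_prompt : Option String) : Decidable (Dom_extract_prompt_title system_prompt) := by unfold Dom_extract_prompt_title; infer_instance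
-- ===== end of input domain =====

-- B replaces A's strip/split/startswith per-line loop by a single multiline-regex search (re.finditer); proved equal on Dom.

-- ===== PORT A =====
-- "for line in system_prompt.strip().split('\n'): line = line.strip(); if line.startswith('# '): return line[2:].strip()"
def pvALoop : List (List Char) → Option String
  | [] => none
  | line :: rest =>
    let l := PySem.Chars.strip line                               -- line = line.strip()
    if PySem.Chars.startswith l ['#', ' ']                        -- line.startswith('# ')
    then some (String.ofList (PySem.Chars.strip (l.drop 2)))      -- line[2:].strip()  (xs[2:] = drop 2, exact for this nonnegative literal slice)
    else pvALoop rest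

def extract_prompt_title (system_prompt : Option String) : Option String :=
  match system_prompt with
  | none => none
  | some s =>
    if s = "" then none                                           -- 'if not system_prompt: return None'
    else pvALoop (PySem.Chars.splitOn (PySem.Chars.strip s.toList) ['\n'])

-- ===== PORT B =====
-- hand port (step for step) of re.finditer(r'^[^\S\n]*# (.*)$', s, re.MULTILINE):
-- character class [^\S\n] = the re module's ASCII whitespace set minus '\n'; exact
def pvLwsB (c : Char) : Bool := c == ' ' || c == '\t' || c == '\r' || c == '\x0b' || c == '\x0c'

-- one anchored match attempt: '[^\S\n]*' is greedy and '#' is not in the class, so no backtracking; '(.*)' stops before '\n'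
def pvTryMatch (s : List Char) : Option (List Char) :=
  match s.dropWhile pvLwsB with
  | '#' :: ' ' :: t => some (t.takeWhile (fun c => c ≠ '\n'))
  | _ => none

-- the loop body at one line start: keep the match iff the stripped group is non-empty ('if title:')
def pvLineMatch (s : List Char) : Option String :=
  match pvTryMatch s with
  | some g =>
    let t := PySem.Chars.strip g                                  -- title = m.group(1).strip()
    if t = [] then none else some (String.ofList t)
  | none => none

-- finditer scan: with re.MULTILINE, '^' matches at the start and right after each '\n', so the
-- engine's next viable start after a failed or consumed line is the position after the next '\n'
def pvFindIter (s : List Char) : Option String :=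
  match pvLineMatch s with
  | some t => some t
  | none =>
    match h : s.dropWhile (fun c => c ≠ '\n') with
    | [] => none
    | _ :: rest => pvFindIter rest
termination_by s.length
decreasing_by
  have hle := List.length_dropWhile_le (fun c => c ≠ '\n') s
  rw [h] at hle
  simp only [List.length_cons] at hle
  omega

def extract_prompt_title_alt (system_prompt : Option String) : Option String :=
  match system_prompt with
  | none => none
  | some s =>
    if s = "" then none                                           -- 'if not system_prompt: return None'
    else pvFindIter (PySem.Chars.strip s.toList)

-- ===== PRECONDITION & SPEC =====
def Spec_extract_prompt_title (system_prompt : Option String) (out : Option String) : Prop := out = extract_prompt_title_alt system_prompt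
instance (system_prompt : Option String) (out : Option String) : Decidable (Spec_extract_prompt_title system_prompt out) := by unfold Spec_extract_prompt_title; infer_instance

-- ===== CLAIM (what is proved, stated in full; the proofs are below) =====
def Claim_equal_extract_prompt_title : Prop := ∀ (system_prompt : Option String), Dom_extract_prompt_title system_prompt → Spec_extract_prompt_title system_prompt (extract_prompt_title system_prompt)

-- ===== LEMMAS AND PROOFS =====

-- the regex class [^\S\n] coincides with Python's str whitespace on domain characters other than '\n'
theorem pvLws_eq_isspace (c : Char) (hd : pvDomChar c = true) (hn : c ≠ '\n') :
    pvLwsB c = PySem.Chars.isspace c := by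
  have hinj : ∀ d : Char, (c == d) = decide (c.toNat = d.toNat) := by
    intro d
    rcases eq_or_ne c d with h | h
    · simp [h]
    · have hne : c.toNat ≠ d.toNat := fun he => h (Char.ext (UInt32.toNat_inj.mp he))
      simp [h, hne]
  have h10 : c.toNat ≠ 10 := fun h => hn (Char.ext (UInt32.toNat_inj.mp h))
  have hd' : ((32 ≤ c.toNat ∧ c.toNat ≤ 126) ∨ c.toNat = 9) ∨ c.toNat = 10 ∨ c.toNat = 13 := by
    simpa [pvDomChar, or_assoc] using hd
  rw [Bool.eq_iff_iff]
  simp only [pvLwsB, PySem.Chars.isspace, hinj,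
    show (' ').toNat = 32 from rfl, show ('\t').toNat = 9 from rfl,
    show ('\r').toNat = 13 from rfl, show ('\x0b').toNat = 11 from rfl,
    show ('\x0c').toNat = 12 from rfl,
    Bool.or_eq_true, Bool.and_eq_true, decide_eq_true_eq]
  omega

theorem pvDropWhile_congr {p q : Char → Bool} (l : List Char)
    (h : ∀ c ∈ l, p c = q c) : l.dropWhile p = l.dropWhile q := by
  induction l with
  | nil => rfl
  | cons c cs ih =>
    have hc := h c (by simp)
    simp only [List.dropWhile_cons, hc]
    split <;> [exact ih fun x hx => h x (by simp [hx]); rfl]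

-- characterisation of PySem.Chars.splitOn on the single-character separator '\n'
def pvSplitNL (pre : List Char) : List Char → List (List Char)
  | [] => [pre]
  | c :: rest => if c = '\n' then pre :: pvSplitNL [] rest else pvSplitNL (pre ++ [c]) rest

theorem pvSplitOn_go_eq (l : List Char) : ∀ (fuel : Nat) (cur : List Char) (acc : List (List Char)),
    l.length < fuel →
    PySem.Chars.splitOn.go ['\n'] fuel l cur acc = acc.reverse ++ pvSplitNL cur.reverse l := by
  induction l with
  | nil =>
    intro fuel cur acc hf
    match fuel with
    | f + 1 => simp [PySem.Chars.splitOn.go, pvSplitNL]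
  | cons c rest ih =>
    intro fuel cur acc hf
    match fuel with
    | f + 1 =>
      rw [PySem.Chars.splitOn.go]
      by_cases hc : c = '\n'
      · subst hc
        have hpre : List.isPrefixOf ['\n'] ('\n' :: rest) = true := by simp [List.isPrefixOf]
        rw [if_pos hpre]
        simp only [List.length_cons, List.drop_succ_cons, List.length_nil, List.drop_zero]
        rw [ih f [] (cur.reverse :: acc) (by simp at hf; omega)]
        simp [pvSplitNL]
      · have hpre : List.isPrefixOf ['\n'] (c :: rest) = false := by
          simp only [List.isPrefixOf, Bool.and_eq_false_imp]
          simp [Ne.symm hc]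
        rw [if_neg (by simp [hpre])]
        rw [ih f (c :: cur) acc (by simp at hf; omega)]
        simp [pvSplitNL, hc]

theorem pvSplitOn_eq (s : List Char) : PySem.Chars.splitOn s ['\n'] = pvSplitNL [] s := by
  have := pvSplitOn_go_eq s (s.length + 1) [] [] (by omega)
  simpa [PySem.Chars.splitOn] using this

theorem pvSplitNL_no_nl (m : List Char) (pre : List Char) (h : '\n' ∉ m) :
    ∀ r, pvSplitNL pre (m ++ r) = pvSplitNL (pre ++ m) r := by
  induction m generalizing pre with
  | nil => simp [pvSplitNL]
  | cons c cs ih =>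
    intro r
    have hc : c ≠ '\n' := fun hc => h (by simp [hc])
    simp only [List.cons_append, pvSplitNL, if_neg hc]
    rw [ih (pre ++ [c]) (fun hm => h (by simp [hm]))]
    simp

-- rstrip toolbox
theorem pvRstrip_append_of_ne_nil (a t : List Char) (h : PySem.Chars.rstrip t ≠ []) :
    PySem.Chars.rstrip (a ++ t) = a ++ PySem.Chars.rstrip t := by
  have hd : t.reverse.dropWhile PySem.Chars.isspace ≠ [] := by
    simpa [PySem.Chars.rstrip] using h
  simp [PySem.Chars.rstrip, List.dropWhile_append, hd]

theorem pvRstrip_append_of_nil (a t : List Char) (h : PySem.Chars.rstrip t = []) :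
    PySem.Chars.rstrip (a ++ t) = PySem.Chars.rstrip a := by
  have hd : t.reverse.dropWhile PySem.Chars.isspace = [] := by
    have := congrArg List.reverse h
    simpa [PySem.Chars.rstrip] using this
  simp [PySem.Chars.rstrip, List.dropWhile_append, hd]

theorem pvRstrip_eq_nil_iff (t : List Char) :
    PySem.Chars.rstrip t = [] ↔ ∀ c ∈ t, PySem.Chars.isspace c = true := by
  constructor
  · intro h c hc
    have hd : t.reverse.dropWhile PySem.Chars.isspace = [] := by
      have := congrArg List.reverse h
      simpa [PySem.Chars.rstrip] using this
    exact List.dropWhile_eq_nil_iff.mp hd c (by simpa using hc)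
  · intro h
    simp [PySem.Chars.rstrip, List.dropWhile_eq_nil_iff]
    exact fun c hc => h c (by simpa using hc)

theorem pvLstrip_eq_nil_iff (t : List Char) :
    PySem.Chars.lstrip t = [] ↔ ∀ c ∈ t, PySem.Chars.isspace c = true := by
  simp [PySem.Chars.lstrip, List.dropWhile_eq_nil_iff]

theorem pvMem_lstrip {c : Char} {l : List Char} (h : c ∈ PySem.Chars.lstrip l) : c ∈ l :=
  (List.dropWhile_sublist _).mem h

theorem pvMem_rstrip {c : Char} {l : List Char} (h : c ∈ PySem.Chars.rstrip l) : c ∈ l := by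
  simp only [PySem.Chars.rstrip, List.mem_reverse] at h
  simpa using (List.dropWhile_sublist _).mem h

theorem pvMem_strip {c : Char} {l : List Char} (h : c ∈ PySem.Chars.strip l) : c ∈ l :=
  pvMem_lstrip (pvMem_rstrip h)

theorem pvStrip_eq_nil_iff (t : List Char) :
    PySem.Chars.strip t = [] ↔ ∀ c ∈ t, PySem.Chars.isspace c = true := by
  constructor
  · intro h c hc
    by_cases hsp : PySem.Chars.isspace c = true
    · exact hsp
    · exfalso
      have hl : c ∈ PySem.Chars.lstrip t := by
        have ht : t = t.takeWhile PySem.Chars.isspace ++ PySem.Chars.lstrip t :=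
          (List.takeWhile_append_dropWhile).symm
        rcases List.mem_append.mp (ht ▸ hc) with h1 | h1
        · exact absurd (List.mem_takeWhile_imp h1) hsp
        · exact h1
      exact hsp ((pvRstrip_eq_nil_iff _).mp h c hl)
  · intro h
    have : PySem.Chars.lstrip t = [] := (pvLstrip_eq_nil_iff t).mpr h
    simp [PySem.Chars.strip, this, PySem.Chars.rstrip]

theorem pvRstrip_cons_of_ne (c : Char) (t : List Char) (h : PySem.Chars.rstrip t ≠ []) :
    PySem.Chars.rstrip (c :: t) = c :: PySem.Chars.rstrip t := by
  simpa using pvRstrip_append_of_ne_nil [c] t h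

theorem pvRstrip_cons_of_nil (c : Char) (t : List Char) (h : PySem.Chars.rstrip t = []) :
    PySem.Chars.rstrip (c :: t) =
      if PySem.Chars.isspace c then [] else [c] := by
  have h2 := pvRstrip_append_of_nil [c] t h
  simp only [List.singleton_append] at h2
  rw [h2]
  simp [PySem.Chars.rstrip, List.dropWhile]
  split <;> simp_all

theorem pvLstrip_rstrip_comm (t : List Char) :
    PySem.Chars.lstrip (PySem.Chars.rstrip t) = PySem.Chars.rstrip (PySem.Chars.lstrip t) := by
  induction t with
  | nil => rfl
  | cons c t' ih =>
    by_cases hsp : PySem.Chars.isspace c = true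
    · have hl : PySem.Chars.lstrip (c :: t') = PySem.Chars.lstrip t' := by
        simp [PySem.Chars.lstrip, List.dropWhile_cons, hsp]
      by_cases hr : PySem.Chars.rstrip t' = []
      · have hall := (pvRstrip_eq_nil_iff t').mp hr
        have h0 : PySem.Chars.rstrip (c :: t') = [] := by
          rw [pvRstrip_cons_of_nil c t' hr]; simp [hsp]
        have hl0 : PySem.Chars.lstrip t' = [] := (pvLstrip_eq_nil_iff t').mpr hall
        rw [h0, hl, hl0]
        rfl
      · rw [pvRstrip_cons_of_ne c t' hr, hl, ← ih]
        simp [PySem.Chars.lstrip, hsp]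
    · have hl : PySem.Chars.lstrip (c :: t') = c :: t' := by
        simp [PySem.Chars.lstrip, hsp]
      rw [hl]
      by_cases hr : PySem.Chars.rstrip t' = []
      · rw [pvRstrip_cons_of_nil c t' hr]
        simp [hsp]
        simp [PySem.Chars.lstrip, List.dropWhile, hsp]
      · rw [pvRstrip_cons_of_ne c t' hr]
        simp [PySem.Chars.lstrip, hsp]

theorem pvRstrip_idem (t : List Char) :
    PySem.Chars.rstrip (PySem.Chars.rstrip t) = PySem.Chars.rstrip t := by
  simp only [PySem.Chars.rstrip, List.reverse_reverse]
  rw [List.dropWhile_idempotent]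

theorem pvStrip_rstrip (t : List Char) :
    PySem.Chars.strip (PySem.Chars.rstrip t) = PySem.Chars.strip t := by
  simp only [PySem.Chars.strip]
  rw [pvLstrip_rstrip_comm, pvRstrip_idem, ← pvLstrip_rstrip_comm, pvLstrip_rstrip_comm]

theorem pvRstrip_prefix (d : List Char) : PySem.Chars.rstrip d <+: d := by
  show (d.reverse.dropWhile PySem.Chars.isspace).reverse <+: d
  have hs : d.reverse.dropWhile PySem.Chars.isspace <:+ d.reverse := List.dropWhile_suffix _
  simpa using hs.reverse

theorem pvDropWhile_head_false {p : Char → Bool} {l : List Char} {c : Char} {r : List Char}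
    (h : l.dropWhile p = c :: r) : p c = false := by
  induction l with
  | nil => simp at h
  | cons a as ih =>
    rw [List.dropWhile_cons] at h
    by_cases hp : p a
    · exact ih (by simpa [hp] using h)
    · obtain ⟨rfl, -⟩ : a = c ∧ as = r := by simpa [hp] using h
      simpa using hp

-- clean unfolding equation for the well-founded pvFindIter
theorem pvFindIter_eq (s : List Char) : pvFindIter s =
    match pvLineMatch s with
    | some t => some t
    | none =>
      match s.dropWhile (fun c => c ≠ '\n') with
      | [] => none
      | _ :: rest => pvFindIter rest := by
  rw [pvFindIter]
  rcases pvLineMatch s with _ | t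
  · rcases hdw : s.dropWhile (fun c => c ≠ '\n') with _ | ⟨c, rest⟩ <;> simp [hdw]
  · rfl

-- one split over pvTryMatch's pattern match, reused by everything below
theorem pvTryMatch_cases (s : List Char) :
    (∃ t, s.dropWhile pvLwsB = '#' :: ' ' :: t ∧ pvTryMatch s = some (t.takeWhile (fun c => c ≠ '\n'))) ∨
    ((∀ t, s.dropWhile pvLwsB ≠ '#' :: ' ' :: t) ∧ pvTryMatch s = none) := by
  unfold pvTryMatch
  split
  · next t heq => exact Or.inl ⟨t, heq, rfl⟩
  · next hne => exact Or.inr ⟨fun t ht => by exact (hne t ht).elim, rfl⟩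

theorem pvTakeWhile_no_nl (t : List Char) (h : '\n' ∉ t) :
    t.takeWhile (fun c => c ≠ '\n') = t := by
  rw [List.takeWhile_eq_self_iff]
  simpa using fun c hc (he : c = '\n') => h (he ▸ hc)

theorem pvTryMatch_append (l rest : List Char) (hn : '\n' ∉ l) :
    pvTryMatch (l ++ '\n' :: rest) = pvTryMatch l := by
  have hnl : pvLwsB '\n' = false := by decide
  have hD : (l ++ '\n' :: rest).dropWhile pvLwsB =
      if (l.dropWhile pvLwsB).isEmpty then '\n' :: rest else l.dropWhile pvLwsB ++ '\n' :: rest := by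
    rw [List.dropWhile_append]
    split <;> simp [List.dropWhile_cons, hnl]
  have hsub : ∀ c ∈ l.dropWhile pvLwsB, c ≠ '\n' :=
    fun c hc he => hn (he ▸ (List.dropWhile_sublist _).mem hc)
  rcases pvTryMatch_cases (l ++ '\n' :: rest) with ⟨t, h1, h2⟩ | ⟨h1, h2⟩ <;>
    rcases pvTryMatch_cases l with ⟨t', h1', h2'⟩ | ⟨h1', h2'⟩
  · -- both match: t = t' ++ '\n' :: rest
    rw [h2, h2']
    rw [hD, h1'] at h1
    simp only [List.isEmpty_cons, if_neg Bool.false_ne_true] at h1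
    have ht : t = t' ++ '\n' :: rest := by
      simpa using h1.symm
    subst ht
    have hnt' : '\n' ∉ t' := fun hm => hsub '\n' (h1' ▸ by simp [hm]) rfl
    rw [List.takeWhile_append, pvTakeWhile_no_nl t' hnt']
    simp
  · -- l++... matches but l does not: impossible
    exfalso
    rw [hD] at h1
    by_cases he : (l.dropWhile pvLwsB).isEmpty
    · rw [if_pos he] at h1
      simp at h1
    · rw [if_neg he] at h1
      obtain ⟨c, ds, hcd⟩ : ∃ c ds, l.dropWhile pvLwsB = c :: ds := by
        cases hx : l.dropWhile pvLwsB
        · simp [hx] at he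
        · exact ⟨_, _, rfl⟩
      rw [hcd] at h1
      rcases ds with _ | ⟨c2, ds'⟩
      · -- [c] ++ '\n'::rest = '#'::' '::t forces ' ' = '\n'
        simp at h1
      · simp at h1
        obtain ⟨rfl, rfl, -⟩ := h1
        exact h1' ds' hcd
  · -- l matches but l++... does not: impossible
    exfalso
    rw [hD, h1'] at h1
    simp only [List.isEmpty_cons, if_neg Bool.false_ne_true] at h1
    exact h1 (t' ++ '\n' :: rest) (by simp)
  · rw [h2, h2']

-- the two per-line conditions agree on domain lines: A's "line.strip().startswith('# ')" with value
-- "line[2:].strip()" versus the regex match with a non-empty stripped group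
theorem pvLineMatch_eq (l : List Char) (hd : ∀ c ∈ l, pvDomChar c = true) (hn : '\n' ∉ l) :
    pvLineMatch l =
      (if PySem.Chars.startswith (PySem.Chars.strip l) ['#', ' ']
       then some (String.ofList (PySem.Chars.strip ((PySem.Chars.strip l).drop 2)))
       else none) := by
  have hdw : l.dropWhile pvLwsB = PySem.Chars.lstrip l :=
    pvDropWhile_congr l fun c hc =>
      pvLws_eq_isspace c (hd c hc) (fun he => hn (he ▸ hc))
  have hstrip : PySem.Chars.strip l = PySem.Chars.rstrip (PySem.Chars.lstrip l) := rfl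
  rcases pvTryMatch_cases l with ⟨t, h1, h2⟩ | ⟨h1, h2⟩
  · -- regex matched: lstrip l = '#' :: ' ' :: t
    rw [hdw] at h1
    have hnt : '\n' ∉ t := fun hm => hn (pvMem_lstrip (h1 ▸ by simp [hm]))
    have htw : t.takeWhile (fun c => c ≠ '\n') = t := pvTakeWhile_no_nl t hnt
    unfold pvLineMatch
    rw [h2, htw]
    by_cases hr : PySem.Chars.rstrip t = []
    · -- whitespace-only title: both sides decline
      have hts : PySem.Chars.strip t = [] :=
        (pvStrip_eq_nil_iff t).mpr ((pvRstrip_eq_nil_iff t).mp hr)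
      rw [hstrip, h1, show ('#' :: ' ' :: t) = ['#', ' '] ++ t from rfl,
        pvRstrip_append_of_nil _ _ hr]
      simp only [hts, if_pos rfl]
      have : PySem.Chars.startswith (PySem.Chars.rstrip ['#', ' ']) ['#', ' '] = false := by decide
      rw [this]
      simp
    · -- real title: both sides return the stripped remainder
      have hts : PySem.Chars.strip t ≠ [] := fun h0 =>
        hr ((pvRstrip_eq_nil_iff t).mpr ((pvStrip_eq_nil_iff t).mp h0))
      rw [hstrip, h1, show ('#' :: ' ' :: t) = ['#', ' '] ++ t from rfl,
        pvRstrip_append_of_ne_nil _ _ hr]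
      have hsw : PySem.Chars.startswith (['#', ' '] ++ PySem.Chars.rstrip t) ['#', ' '] = true := by
        rw [PySem.Chars.startswith_iff]
        exact ⟨_, rfl⟩
      have hdrop : List.drop 2 (['#', ' '] ++ PySem.Chars.rstrip t) = PySem.Chars.rstrip t := rfl
      rw [hsw]
      simp only [if_true, if_neg hts, hdrop, pvStrip_rstrip]
  · -- no regex match: A's startswith must fail as well
    unfold pvLineMatch
    rw [h2]
    rw [hdw] at h1
    have hsw : PySem.Chars.startswith (PySem.Chars.strip l) ['#', ' '] = false := by
      by_contra hne
      have hsw' : PySem.Chars.startswith (PySem.Chars.strip l) ['#', ' '] = true := by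
        simpa using hne
      have hpre : ['#', ' '] <+: PySem.Chars.lstrip l :=
        (PySem.Chars.startswith_iff _ _).mp hsw' |>.trans (hstrip ▸ pvRstrip_prefix _)
      obtain ⟨t, ht⟩ := hpre
      exact h1 t (by simpa using ht.symm)
    rw [hsw]
    simp

-- B's scan consumes exactly one line per step
theorem pvFindIter_append (l rest : List Char) (hn : '\n' ∉ l) :
    pvFindIter (l ++ '\n' :: rest) =
      match pvLineMatch l with
      | some t => some t
      | none => pvFindIter rest := by
  have hlm : pvLineMatch (l ++ '\n' :: rest) = pvLineMatch l := by
    unfold pvLineMatch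
    rw [pvTryMatch_append l rest hn]
  have hdw : (l ++ '\n' :: rest).dropWhile (fun c => c ≠ '\n') = '\n' :: rest := by
    have h0 : l.dropWhile (fun c => c ≠ '\n') = [] := by
      rw [List.dropWhile_eq_nil_iff]
      intro c hc
      simp only [decide_eq_true_eq]
      exact fun he => hn (he ▸ hc)
    rw [List.dropWhile_append, h0]
    simp
  rw [pvFindIter_eq, hlm, hdw]

theorem pvFindIter_no_nl (s : List Char) (hn : '\n' ∉ s) :
    pvFindIter s =
      match pvLineMatch s with
      | some t => some t
      | none => none := by
  have hdw : s.dropWhile (fun c => c ≠ '\n') = [] := by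
    rw [List.dropWhile_eq_nil_iff]
    intro c hc
    simp only [decide_eq_true_eq]
    exact fun he => hn (he ▸ hc)
  rw [pvFindIter_eq, hdw]

theorem pvMainAux : ∀ (n : Nat) (s : List Char), s.length ≤ n → (∀ c ∈ s, pvDomChar c = true) →
    pvALoop (PySem.Chars.splitOn s ['\n']) = pvFindIter s := by
  intro n
  induction n with
  | zero =>
    intro s hle _
    have : s = [] := List.eq_nil_of_length_eq_zero (by omega)
    subst this
    rw [pvSplitOn_eq, pvFindIter_no_nl [] (by simp)]
    rfl
  | succ n ih =>
    intro s hle hd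
    have hsplit : s.takeWhile (fun c => c ≠ '\n') ++ s.dropWhile (fun c => c ≠ '\n') = s :=
      List.takeWhile_append_dropWhile
    set l := s.takeWhile (fun c => c ≠ '\n') with hl
    have hnl : '\n' ∉ l := fun hm => by
      have := List.mem_takeWhile_imp hm
      simp at this
    have hdl : ∀ c ∈ l, pvDomChar c = true := fun c hc =>
      hd c (by rw [← hsplit]; exact List.mem_append.mpr (Or.inl hc))
    cases hr : s.dropWhile (fun c => c ≠ '\n') with
    | nil =>
      -- single line: s = l, no '\n' in s
      have hs : s = l := by rw [← hsplit, hr, List.append_nil]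
      rw [hs, pvSplitOn_eq, pvFindIter_no_nl l hnl]
      have : pvSplitNL [] l = [l] := by
        have := pvSplitNL_no_nl l [] hnl []
        simpa using this
      rw [this, pvLineMatch_eq l hdl hnl]
      by_cases hsw : PySem.Chars.startswith (PySem.Chars.strip l) ['#', ' '] = true
      · simp [pvALoop, hsw]
      · simp [pvALoop, hsw]
    | cons c rest =>
      have hc : c = '\n' := by
        have := pvDropWhile_head_false hr
        simpa using this
      subst hc
      have hs : s = l ++ '\n' :: rest := by rw [← hsplit, hr]
      have hdr : ∀ c ∈ rest, pvDomChar c = true := fun x hx =>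
        hd x (by rw [hs]; simp [hx])
      have hlen : rest.length ≤ n := by
        have := congrArg List.length hs
        simp at this
        omega
      rw [hs, pvSplitOn_eq]
      rw [pvSplitNL_no_nl l [] hnl ('\n' :: rest)]
      simp only [List.nil_append, pvSplitNL, if_pos]
      rw [pvFindIter_append l rest hnl]
      have hrec : pvALoop (pvSplitNL [] rest) = pvFindIter rest := by
        rw [← pvSplitOn_eq]
        exact ih rest hlen hdr
      rw [pvLineMatch_eq l hdl hnl]
      by_cases hsw : PySem.Chars.startswith (PySem.Chars.strip l) ['#', ' '] = true
      · simp [pvALoop, hsw]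
      · simp [pvALoop, hsw, hrec]

theorem pvMain (s : List Char) (hd : ∀ c ∈ s, pvDomChar c = true) :
    pvALoop (PySem.Chars.splitOn s ['\n']) = pvFindIter s :=
  pvMainAux s.length s le_rfl hd

-- ===== VERDICT (by name: the statement is the Claim_ definition above) =====
theorem extract_prompt_title_spec : Claim_equal_extract_prompt_title := by
  intro sp hdom
  unfold Spec_extract_prompt_title
  match sp with
  | none => rfl
  | some s =>
    simp only [extract_prompt_title, extract_prompt_title_alt]
    split
    · rfl
    · apply pvMain
      intro c hc
      have hall : s.toList.all pvDomChar = true := by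
        simpa [Dom_extract_prompt_title, pvDomStr] using hdom
      exact (List.all_eq_true.mp hall) c (pvMem_strip hc)
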